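-- pv_equiv track=rewrite | github.com/arartawil/graph-coloring-platform | puzzles/map_coloring.py | _normalize_regions
-- ===== SOURCE A (Python) =====
-- def _normalize_regions(regions):
--     normalized = {}
--     for region, neighbors in regions.items():
--         normalized.setdefault(region, set())
--         for neighbor in neighbors:
--             if neighbor == region:
--                 continue
--             normalized[region].add(neighbor)
--             normalized.setdefault(neighbor, set()).add(region)
--     return {k: sorted(v) for k, v in normalized.items()}
-- ===== SOURCE B (Python) =====
-- def _normalize_regions(regions):
--     # Per-node query decomposition: first compute the output key order, then
--     # each node's sorted neighbor list is derived independently by a fresh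
--     # scan of the whole input (out-neighbors from its own row, in-neighbors
--     # from every other row); no incremental adjacency structure is built.
--     order = []
--     for region, neighbors in regions.items():
--         if region not in order:
--             order.append(region)
--         for n in neighbors:
--             if n != region and n not in order:
--                 order.append(n)
--
--     def neighbors_of(k):
--         acc = set()
--         for region, neighbors in regions.items():
--             if region == k:
--                 acc.update(n for n in neighbors if n != k)
--             elif k in neighbors:
--                 acc.add(region)
--         return sorted(acc)
--
--     return {k: neighbors_of(k) for k in order}
-- ===== Notes on version B (the rewrite author's own statement) =====
-- stated objective: alternative
-- what changed: Replaces A's single incremental dict-of-sets construction by a per-node query decomposition: one pass fixes the output key order, then each node's sorted neighbor list is computed independently by a fresh scan of the whole input (out-neighbors from its own row, in-neighbors from every other row), with no adjacency structure built incrementally.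
import Mathlib
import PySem

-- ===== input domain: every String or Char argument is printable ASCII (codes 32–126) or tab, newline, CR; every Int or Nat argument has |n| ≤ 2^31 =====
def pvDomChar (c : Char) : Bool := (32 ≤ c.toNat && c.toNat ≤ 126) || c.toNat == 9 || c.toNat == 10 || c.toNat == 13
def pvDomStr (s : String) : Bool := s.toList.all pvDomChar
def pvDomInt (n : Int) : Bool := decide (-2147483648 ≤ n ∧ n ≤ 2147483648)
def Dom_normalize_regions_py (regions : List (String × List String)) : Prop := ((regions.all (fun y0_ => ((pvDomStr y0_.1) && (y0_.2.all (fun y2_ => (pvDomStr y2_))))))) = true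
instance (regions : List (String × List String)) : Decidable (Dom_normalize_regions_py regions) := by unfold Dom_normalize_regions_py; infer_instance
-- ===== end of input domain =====

-- B replaces A's incremental dict-of-sets construction by a per-node query
-- decomposition: one pass fixes the output key order, then each node's neighbor
-- list is computed independently by a fresh scan of the whole input;
-- objective: a structurally different implementation (no incremental adjacency).

-- ===== PORT A =====
def stepA_inner (region : String) (d : PySem.Dict String (PySem.Set String)) (neighbor : String) :
    PySem.Dict String (PySem.Set String) :=
  if neighbor == region then d
  else
    ((d.modify region PySem.Set.empty (fun s => PySem.Set.add s neighbor)).modify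
      neighbor PySem.Set.empty (fun s => PySem.Set.add s region))

def stepA (d : PySem.Dict String (PySem.Set String)) (rp : String × List String) :
    PySem.Dict String (PySem.Set String) :=
  rp.2.foldl (stepA_inner rp.1) (d.setdefault rp.1 PySem.Set.empty)

def normalize_regions_py (regions : List (String × List String)) : List (String × List String) :=
  let normalized := regions.foldl stepA PySem.Dict.empty
  normalized.items.map (fun kv => (kv.1, PySem.List.sorted kv.2 (fun x => x) false))

-- ===== PORT B =====
/-- First pass of B: the output key order (`order` in Source B). -/
def orderStep (order : List String) (rp : String × List String) : List String :=
  let o1 := if order.contains rp.1 then order else order ++ [rp.1]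
  rp.2.foldl (fun o n => if n ≠ rp.1 ∧ ¬ o.contains n then o ++ [n] else o) o1

/-- `neighbors_of(k)` in Source B: a fresh scan of the whole input for one node. -/
def nbrsOf (regions : List (String × List String)) (k : String) : List String :=
  let acc := regions.foldl (fun (acc : PySem.Set String) rp =>
    if rp.1 == k then
      rp.2.foldl (fun a n => if n == k then a else PySem.Set.add a n) acc
    else if rp.2.contains k then PySem.Set.add acc rp.1
    else acc) PySem.Set.empty
  PySem.List.sorted acc (fun x => x) false

def normalize_regions_py_alt (regions : List (String × List String)) : List (String × List String) :=
  let order := regions.foldl orderStep []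
  order.map (fun k => (k, nbrsOf regions k))

-- ===== PRECONDITION & SPEC =====
def Spec_normalize_regions_py (regions : List (String × List String)) (out : List (String × List String)) : Prop := out = normalize_regions_py_alt regions
instance (regions : List (String × List String)) (out : List (String × List String)) : Decidable (Spec_normalize_regions_py regions out) := by unfold Spec_normalize_regions_py; infer_instance

-- ===== CLAIM (what is proved, stated in full; the proofs are below) =====
def Claim_equal_normalize_regions_py : Prop := ∀ (regions : List (String × List String)), Dom_normalize_regions_py regions → Spec_normalize_regions_py regions (normalize_regions_py regions)

-- ===== LEMMAS AND PROOFS =====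

-- Ghost state for the proof: the (nodes, seen, edges) view of A's traversal.
def stepG_inner (region : String)
    (st : List String × PySem.Set String × PySem.Set (String × String)) (neighbor : String) :
    List String × PySem.Set String × PySem.Set (String × String) :=
  if neighbor == region then st
  else
    let edges := PySem.Set.add (PySem.Set.add st.2.2 (region, neighbor)) (neighbor, region)
    if PySem.Set.contains st.2.1 neighbor then (st.1, st.2.1, edges)
    else (st.1 ++ [neighbor], PySem.Set.add st.2.1 neighbor, edges)

def stepG (st : List String × PySem.Set String × PySem.Set (String × String))
    (rp : String × List String) :
    List String × PySem.Set String × PySem.Set (String × String) :=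
  let st0 := if PySem.Set.contains st.2.1 rp.1 then st
             else (st.1 ++ [rp.1], PySem.Set.add st.2.1 rp.1, st.2.2)
  rp.2.foldl (stepG_inner rp.1) st0

/-- Targets of node `k` in the directed edge list, in order. -/
def tgts (edges : List (String × String)) (k : String) : List String :=
  (edges.filter (fun e => e.1 == k)).map (fun e => e.2)

/-- Coupling invariant between A's dict-of-sets and the ghost (nodes, seen, edges) state. -/
def InvAB (d : PySem.Dict String (PySem.Set String))
    (st : List String × PySem.Set String × PySem.Set (String × String)) : Prop :=
  st.2.1 = st.1 ∧ (∀ e ∈ st.2.2, e.1 ∈ st.1) ∧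
  d.items = st.1.map (fun n => (n, tgts st.2.2 n))

theorem mem_tgts (edges : List (String × String)) (a b : String) :
    b ∈ tgts edges a ↔ (a, b) ∈ edges := by
  simp [tgts, List.mem_map, List.mem_filter]

theorem tgts_append (edges l : List (String × String)) (k : String) :
    tgts (edges ++ l) k = tgts edges k ++ tgts l k := by
  simp [tgts]

theorem set_add_eq {α : Type} [BEq α] [LawfulBEq α] (s : PySem.Set α) (x : α) :
    PySem.Set.add s x = if x ∈ s then s else s ++ [x] := by
  simp [PySem.Set.add, PySem.Set.contains, List.contains_eq_mem]

theorem tgts_snoc (edges : List (String × String)) (a b k : String) :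
    tgts (edges ++ [(a, b)]) k = if k = a then tgts edges k ++ [b] else tgts edges k := by
  rw [tgts_append]
  by_cases h : k = a
  · subst h; simp [tgts]
  · have hb : (a == k) = false := by simp [Ne.symm h]
    simp [tgts, List.filter, h, hb]

theorem tgts_nil_of_not_src (edges : List (String × String)) (k : String)
    (h : ∀ e ∈ edges, e.1 ≠ k) : tgts edges k = [] := by
  simp only [tgts, List.map_eq_nil_iff, List.filter_eq_nil_iff]
  intro e he
  simpa using h e he

theorem getD_mk_map (nodes : List String) (t : String → PySem.Set String) (k : String)
    (dflt : PySem.Set String) :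
    (PySem.Dict.mk (nodes.map (fun n => (n, t n)))).getD k dflt =
      if k ∈ nodes then t k else dflt := by
  induction nodes with
  | nil => simp [PySem.Dict.getD, PySem.Dict.get?]
  | cons n rest ih =>
    by_cases h : n = k
    · subst h
      simp [PySem.Dict.getD, PySem.Dict.get?]
    · have : (PySem.Dict.mk ((n :: rest).map (fun n => (n, t n)))).getD k dflt
          = (PySem.Dict.mk (rest.map (fun n => (n, t n)))).getD k dflt := by
        simp [PySem.Dict.getD, PySem.Dict.get?, List.find?, h]
      rw [this, ih]
      simp [h, Ne.symm h]

theorem contains_mk_map (nodes : List String) (t : String → PySem.Set String) (k : String) :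
    (PySem.Dict.mk (nodes.map (fun n => (n, t n)))).contains k = decide (k ∈ nodes) := by
  simp only [PySem.Dict.contains_mk]
  induction nodes with
  | nil => simp
  | cons x xs ih =>
    by_cases h : x = k
    · simp [h, ih]
    · have h1 : (x == k) = false := by simp [h]
      have h2 : decide (k = x) = false := decide_eq_false (fun hh => h hh.symm)
      simp [ih, h1, h2]

theorem insert_mk_map_mem (nodes : List String) (t : String → PySem.Set String) (k : String)
    (v : PySem.Set String) (hk : k ∈ nodes) :
    (PySem.Dict.mk (nodes.map (fun n => (n, t n)))).insert k v =
      PySem.Dict.mk (nodes.map (fun n => (n, if n = k then v else t n))) := by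
  have hc : (PySem.Dict.mk (nodes.map (fun n => (n, t n)))).contains k = true := by
    rw [contains_mk_map]; simpa using hk
  simp only [PySem.Dict.insert, hc, if_true, List.map_map]
  congr 1
  apply List.map_congr_left
  intro n _
  by_cases h : n = k <;> simp [h]

theorem insert_mk_map_not_mem (nodes : List String) (t : String → PySem.Set String) (k : String)
    (v : PySem.Set String) (hk : k ∉ nodes) :
    (PySem.Dict.mk (nodes.map (fun n => (n, t n)))).insert k v =
      PySem.Dict.mk ((nodes ++ [k]).map (fun n => (n, if n = k then v else t n))) := by
  have hc : (PySem.Dict.mk (nodes.map (fun n => (n, t n)))).contains k = false := by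
    rw [contains_mk_map]; simpa using hk
  have h1 : nodes.map (fun n => (n, t n)) = nodes.map (fun n => (n, if n = k then v else t n)) :=
    List.map_congr_left (fun n hn => by
      have : n ≠ k := fun h => hk (h ▸ hn)
      simp [this])
  rw [PySem.Dict.insert, if_neg (by rw [hc]; simp)]
  simp only [List.map_append, List.map_cons, List.map_nil, PySem.Dict.mk.injEq]
  rw [← h1]
  simp

/-- One inner iteration preserves the invariant (and the nodes list only grows). -/
theorem inner_step (region : String) (d : PySem.Dict String (PySem.Set String))
    (st : List String × PySem.Set String × PySem.Set (String × String))
    (neighbor : String) (hinv : InvAB d st) (hreg : region ∈ st.1) :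
    InvAB (stepA_inner region d neighbor) (stepG_inner region st neighbor) ∧
      region ∈ (stepG_inner region st neighbor).1 := by
  obtain ⟨nds, seen, edges⟩ := st
  obtain ⟨hseen, hedge, hitems⟩ := hinv
  simp only at hseen hedge hitems hreg
  subst hseen
  by_cases heq : neighbor = region
  · subst heq
    simp only [stepA_inner, stepG_inner, beq_self_eq_true, if_true]
    exact ⟨⟨rfl, hedge, hitems⟩, hreg⟩
  have hbeq : (neighbor == region) = false := by simp [heq]
  have hd : d = PySem.Dict.mk (seen.map (fun n => (n, tgts edges n))) := PySem.Dict.ext hitems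
  subst hd
  set E1 := PySem.Set.add edges (region, neighbor) with hE1
  set E2 := PySem.Set.add E1 (neighbor, region) with hE2
  have hne2 : ((neighbor, region) ∈ E1) ↔ ((neighbor, region) ∈ edges) := by
    rw [hE1, set_add_eq]
    split_ifs with h1
    · exact Iff.rfl
    · simp [heq]
  have htg : ∀ k, tgts E2 k =
      if k = region then (if (region, neighbor) ∈ edges then tgts edges k else tgts edges k ++ [neighbor])
      else if k = neighbor then (if (neighbor, region) ∈ edges then tgts edges k else tgts edges k ++ [region])
      else tgts edges k := by
    intro k
    rw [hE2, set_add_eq, hE1, set_add_eq]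
    by_cases h1 : (region, neighbor) ∈ edges <;>
      by_cases h2 : (neighbor, region) ∈ edges <;>
        simp only [h1, h2, if_true, if_false, List.mem_append, List.mem_singleton,
          Prod.mk.injEq, heq, Ne.symm heq, and_false, false_and, or_false, if_pos, if_neg,
          not_false_eq_true, tgts_snoc] <;>
      by_cases hk1 : k = region <;> by_cases hk2 : k = neighbor <;>
        simp_all [tgts_snoc]
  have hsrc2 : ∀ e ∈ E2, e.1 ∈ seen ∨ e.1 = neighbor := by
    intro e he
    rw [hE2, set_add_eq] at he
    split_ifs at he with h2
    · rw [hE1, set_add_eq] at he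
      split_ifs at he with h1
      · exact Or.inl (hedge e he)
      · rcases List.mem_append.1 he with h | h
        · exact Or.inl (hedge e h)
        · simp at h; subst h; exact Or.inl hreg
    · rcases List.mem_append.1 he with h | h
      · rw [hE1, set_add_eq] at h
        split_ifs at h with h1
        · exact Or.inl (hedge e h)
        · rcases List.mem_append.1 h with h | h
          · exact Or.inl (hedge e h)
          · simp at h; subst h; exact Or.inl hreg
      · simp at h; subst h; exact Or.inr rfl
  have hgetr : (PySem.Dict.mk (seen.map (fun n => (n, tgts edges n)))).getD region PySem.Set.empty
      = tgts edges region := by rw [getD_mk_map]; simp [hreg]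
  have hd1 : (PySem.Dict.mk (seen.map (fun n => (n, tgts edges n)))).modify region
      PySem.Set.empty (fun s => PySem.Set.add s neighbor)
      = PySem.Dict.mk (seen.map (fun n =>
          (n, if n = region then PySem.Set.add (tgts edges region) neighbor else tgts edges n))) := by
    rw [PySem.Dict.modify, hgetr, insert_mk_map_mem _ _ _ _ hreg]
  by_cases hn : neighbor ∈ seen
  · have hg1 : (PySem.Dict.mk (seen.map (fun n =>
        (n, if n = region then PySem.Set.add (tgts edges region) neighbor else tgts edges n)))).getD
        neighbor PySem.Set.empty = tgts edges neighbor := by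
      rw [getD_mk_map]; simp [hn, heq]
    constructor
    · refine ⟨?_, ?_, ?_⟩
      · simp [stepG_inner, hbeq, PySem.Set.contains, List.contains_eq_mem, hn]
      · simp only [stepG_inner, hbeq, Bool.false_eq_true, if_false,
          PySem.Set.contains, List.contains_eq_mem, hn, decide_true, if_true]
        intro e he
        rcases hsrc2 e he with h | h
        · exact h
        · exact h ▸ hn
      · simp only [stepG_inner, hbeq, Bool.false_eq_true, if_false,
          PySem.Set.contains, List.contains_eq_mem, hn, decide_true, if_true]
        simp only [stepA_inner, hbeq, Bool.false_eq_true, if_false]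
        rw [hd1, PySem.Dict.modify, hg1, insert_mk_map_mem _ _ _ _ hn]
        simp only [PySem.Dict.mk.injEq]
        apply List.map_congr_left
        intro n _
        rw [htg n]
        by_cases hk1 : n = region <;> by_cases hk2 : n = neighbor <;>
          simp_all [set_add_eq, mem_tgts]
    · simpa [stepG_inner, hbeq, PySem.Set.contains, List.contains_eq_mem, hn] using hreg
  · have hm2 : (neighbor, region) ∉ edges := fun h => hn (hedge _ h)
    have hg1 : (PySem.Dict.mk (seen.map (fun n =>
        (n, if n = region then PySem.Set.add (tgts edges region) neighbor else tgts edges n)))).getD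
        neighbor PySem.Set.empty = PySem.Set.empty := by
      rw [getD_mk_map]; simp [hn]
    have htnil : tgts edges neighbor = [] :=
      tgts_nil_of_not_src _ _ (fun e he h => hn (h ▸ hedge e he))
    constructor
    · refine ⟨?_, ?_, ?_⟩
      · simp [stepG_inner, hbeq, PySem.Set.contains, List.contains_eq_mem, hn, set_add_eq]
      · simp only [stepG_inner, hbeq, Bool.false_eq_true, if_false,
          PySem.Set.contains, List.contains_eq_mem, hn, decide_false, if_false]
        intro e he
        rcases hsrc2 e he with h | h
        · exact List.mem_append.2 (Or.inl h)
        · simp [h]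
      · simp only [stepG_inner, hbeq, Bool.false_eq_true, if_false,
          PySem.Set.contains, List.contains_eq_mem, hn, decide_false, if_false]
        simp only [stepA_inner, hbeq, Bool.false_eq_true, if_false]
        rw [hd1, PySem.Dict.modify, hg1, insert_mk_map_not_mem _ _ _ _ (by simpa using hn)]
        simp only [PySem.Dict.mk.injEq]
        apply List.map_congr_left
        intro n hnmem
        rw [htg n]
        have hadd : PySem.Set.add PySem.Set.empty region = [region] := by
          simp [set_add_eq, PySem.Set.empty]
        by_cases hk1 : n = region <;> by_cases hk2 : n = neighbor <;>
          simp_all [set_add_eq, mem_tgts, hm2, htnil]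
    · simp only [stepG_inner, hbeq, Bool.false_eq_true, if_false,
        PySem.Set.contains, List.contains_eq_mem, hn, decide_false, if_false]
      exact List.mem_append.2 (Or.inl hreg)

/-- Inner fold preserves the invariant. -/
theorem inner_fold (region : String) (neighbors : List String)
    (d : PySem.Dict String (PySem.Set String))
    (st : List String × PySem.Set String × PySem.Set (String × String))
    (hinv : InvAB d st) (hreg : region ∈ st.1) :
    InvAB (neighbors.foldl (stepA_inner region) d) (neighbors.foldl (stepG_inner region) st) := by
  induction neighbors generalizing d st with
  | nil => simpa using hinv
  | cons x xs ih =>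
    have h := inner_step region d st x hinv hreg
    exact ih _ _ h.1 h.2

/-- One outer iteration preserves the invariant. -/
theorem outer_step (d : PySem.Dict String (PySem.Set String))
    (st : List String × PySem.Set String × PySem.Set (String × String))
    (rp : String × List String) (hinv : InvAB d st) :
    InvAB (stepA d rp) (stepG st rp) := by
  obtain ⟨nds, seen, edges⟩ := st
  obtain ⟨hseen, hedge, hitems⟩ := hinv
  simp only at hseen hedge hitems
  subst hseen
  have hd : d = PySem.Dict.mk (seen.map (fun n => (n, tgts edges n))) := PySem.Dict.ext hitems
  subst hd
  by_cases hr : rp.1 ∈ seen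
  · have hc : (PySem.Dict.mk (seen.map (fun n => (n, tgts edges n)))).contains rp.1 = true := by
      rw [contains_mk_map]; simpa using hr
    simp only [stepA, stepG, PySem.Dict.setdefault, hc, if_true,
      PySem.Set.contains, List.contains_eq_mem, hr, decide_true]
    exact inner_fold _ _ _ _ ⟨rfl, hedge, rfl⟩ hr
  · have hc : (PySem.Dict.mk (seen.map (fun n => (n, tgts edges n)))).contains rp.1 = false := by
      rw [contains_mk_map]; simpa using hr
    have htnil : tgts edges rp.1 = [] :=
      tgts_nil_of_not_src _ _ (fun e he h => hr (h ▸ hedge e he))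
    simp only [stepA, stepG, PySem.Dict.setdefault, hc, Bool.false_eq_true, if_false,
      PySem.Set.contains, List.contains_eq_mem, hr, decide_false]
    apply inner_fold
    · refine ⟨by simp [set_add_eq, hr], ?_, ?_⟩
      · intro e he
        exact List.mem_append.2 (Or.inl (hedge e he))
      · simp only [List.map_append, List.map_cons, List.map_nil, htnil]
        rfl
    · exact List.mem_append.2 (Or.inr (by simp))

theorem outer_fold (regions : List (String × List String))
    (d : PySem.Dict String (PySem.Set String))
    (st : List String × PySem.Set String × PySem.Set (String × String)) (hinv : InvAB d st) :
    InvAB (regions.foldl stepA d) (regions.foldl stepG st) := by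
  induction regions generalizing d st with
  | nil => simpa using hinv
  | cons rp rest ih => exact ih _ _ (outer_step d st rp hinv)

-- ---- B's order pass computes the ghost nodes list ----

theorem order_inner_eq (region : String) (ns : List String)
    (st : List String × PySem.Set String × PySem.Set (String × String)) (h : st.2.1 = st.1) :
    (ns.foldl (stepG_inner region) st).1 =
      ns.foldl (fun o n => if n ≠ region ∧ ¬ o.contains n then o ++ [n] else o) st.1 ∧
    (ns.foldl (stepG_inner region) st).2.1 = (ns.foldl (stepG_inner region) st).1 := by
  induction ns generalizing st with
  | nil => exact ⟨rfl, h⟩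
  | cons x xs ih =>
    have hstep : (stepG_inner region st x).1 =
        (if x ≠ region ∧ ¬ st.1.contains x then st.1 ++ [x] else st.1) ∧
        (stepG_inner region st x).2.1 = (stepG_inner region st x).1 := by
      obtain ⟨nds, seen, edges⟩ := st
      simp only at h; subst h
      by_cases heq : x = region
      · constructor <;> simp [stepG_inner, heq]
      · have hbeq : (x == region) = false := by simp [heq]
        by_cases hx : x ∈ seen
        · have hc : PySem.Set.contains seen x = true := by
            simpa [PySem.Set.contains, List.contains_eq_mem] using hx
          constructor <;> simp [stepG_inner, hbeq, heq, List.contains_eq_mem, hx]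
        · have hc : PySem.Set.contains seen x = false := by
            simpa [PySem.Set.contains, List.contains_eq_mem] using hx
          constructor <;>
            simp [stepG_inner, hbeq, heq, List.contains_eq_mem, hx, set_add_eq]
    rcases hstep with ⟨h1, h2⟩
    have := ih (stepG_inner region st x) h2
    rw [h1] at this
    exact this

theorem order_step_eq (st : List String × PySem.Set String × PySem.Set (String × String))
    (rp : String × List String) (h : st.2.1 = st.1) :
    (stepG st rp).1 = orderStep st.1 rp ∧ (stepG st rp).2.1 = (stepG st rp).1 := by
  obtain ⟨nds, seen, edges⟩ := st
  simp only at h; subst h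
  unfold stepG orderStep
  by_cases hr : rp.1 ∈ seen
  · simp only [PySem.Set.contains, List.contains_eq_mem, hr, decide_true, if_true]
    simpa only [List.contains_eq_mem] using order_inner_eq rp.1 rp.2 (seen, seen, edges) rfl
  · have hadd : PySem.Set.add seen rp.1 = seen ++ [rp.1] := by rw [set_add_eq, if_neg hr]
    simp only [PySem.Set.contains, List.contains_eq_mem, hr, decide_false,
      Bool.false_eq_true, if_false]
    simpa only [List.contains_eq_mem] using
      order_inner_eq rp.1 rp.2 (seen ++ [rp.1], PySem.Set.add seen rp.1, edges) (by simp [hadd])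

theorem order_fold_eq (regions : List (String × List String))
    (st : List String × PySem.Set String × PySem.Set (String × String)) (h : st.2.1 = st.1) :
    (regions.foldl stepG st).1 = regions.foldl orderStep st.1 := by
  induction regions generalizing st with
  | nil => rfl
  | cons rp rest ih =>
    have := order_step_eq st rp h
    rw [List.foldl_cons, List.foldl_cons, ih _ this.2, this.1]

-- ---- membership characterization of the ghost edge set ----

def EdgeIn (regions : List (String × List String)) (a b : String) : Prop :=
  ∃ rp ∈ regions, b ≠ a ∧ ((rp.1 = a ∧ b ∈ rp.2) ∨ (rp.1 = b ∧ a ∈ rp.2))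

theorem stepG_inner_edges (region : String)
    (st : List String × PySem.Set String × PySem.Set (String × String)) (x : String) :
    (stepG_inner region st x).2.2 =
      if x = region then st.2.2
      else PySem.Set.add (PySem.Set.add st.2.2 (region, x)) (x, region) := by
  unfold stepG_inner
  by_cases heq : x = region
  · simp [heq]
  · have hbeq : (x == region) = false := by simp [heq]
    simp only [hbeq, Bool.false_eq_true, if_false, if_neg heq]
    split_ifs <;> rfl

theorem mem_edges_inner (region : String) (ns : List String)
    (st : List String × PySem.Set String × PySem.Set (String × String)) (e : String × String) :
    e ∈ (ns.foldl (stepG_inner region) st).2.2 ↔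
      e ∈ st.2.2 ∨ ∃ n ∈ ns, n ≠ region ∧ (e = (region, n) ∨ e = (n, region)) := by
  induction ns generalizing st with
  | nil => simp
  | cons x xs ih =>
    rw [List.foldl_cons, ih]
    have hx : e ∈ (stepG_inner region st x).2.2 ↔
        e ∈ st.2.2 ∨ (x ≠ region ∧ (e = (region, x) ∨ e = (x, region))) := by
      rw [stepG_inner_edges]
      by_cases heq : x = region
      · simp [heq]
      · simp only [if_neg heq, PySem.Set.mem_add]
        tauto
    rw [hx]
    constructor
    · rintro (h | h)
      · rcases h with h | h
        · exact Or.inl h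
        · exact Or.inr ⟨x, by simp, h.1, h.2⟩
      · rcases h with ⟨n, hn, h⟩
        exact Or.inr ⟨n, by simp [hn], h⟩
    · rintro (h | ⟨n, hn, h⟩)
      · exact Or.inl (Or.inl h)
      · rcases List.mem_cons.1 hn with rfl | hn
        · exact Or.inl (Or.inr h)
        · exact Or.inr ⟨n, hn, h⟩

theorem mem_edges_fold (regions : List (String × List String))
    (st : List String × PySem.Set String × PySem.Set (String × String)) (e : String × String) :
    e ∈ (regions.foldl stepG st).2.2 ↔
      e ∈ st.2.2 ∨ EdgeIn regions e.1 e.2 := by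
  induction regions generalizing st with
  | nil => simp [EdgeIn]
  | cons rp rest ih =>
    rw [List.foldl_cons, ih]
    have hstep : e ∈ (stepG st rp).2.2 ↔
        e ∈ st.2.2 ∨ ∃ n ∈ rp.2, n ≠ rp.1 ∧ (e = (rp.1, n) ∨ e = (n, rp.1)) := by
      unfold stepG
      split_ifs with h
      · exact mem_edges_inner _ _ _ _
      · rw [mem_edges_inner]
    rw [hstep]
    unfold EdgeIn
    constructor
    · rintro ((h | ⟨n, hn, hne, h⟩) | h)
      · exact Or.inl h
      · refine Or.inr ⟨rp, by simp, ?_⟩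
        rcases h with rfl | rfl
        · exact ⟨by simpa using hne, Or.inl ⟨rfl, hn⟩⟩
        · exact ⟨by simpa [Ne, eq_comm] using hne, Or.inr ⟨rfl, hn⟩⟩
      · rcases h with ⟨q, hq, h⟩
        exact Or.inr ⟨q, by simp [hq], h⟩
    · rintro (h | ⟨q, hq, hne, h⟩)
      · exact Or.inl (Or.inl h)
      · rcases List.mem_cons.1 hq with rfl | hq
        · rcases h with ⟨h1, h2⟩ | ⟨h1, h2⟩
          · exact Or.inl (Or.inr ⟨e.2, h2, by simpa [h1] using hne, Or.inl (by simp [h1])⟩)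
          · exact Or.inl (Or.inr ⟨e.1, h2, by simpa [h1, Ne, eq_comm] using hne,
              Or.inr (by simp [h1])⟩)
        · exact Or.inr ⟨q, hq, hne, h⟩

-- ---- membership characterization of B's per-node accumulator ----

def bAccStep (k : String) (acc : PySem.Set String) (rp : String × List String) : PySem.Set String :=
  if rp.1 == k then
    rp.2.foldl (fun a n => if n == k then a else PySem.Set.add a n) acc
  else if rp.2.contains k then PySem.Set.add acc rp.1
  else acc

theorem mem_bacc_inner (k : String) (ns : List String) (acc : PySem.Set String) (m : String) :
    m ∈ ns.foldl (fun a n => if n == k then a else PySem.Set.add a n) acc ↔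
      m ∈ acc ∨ (m ∈ ns ∧ m ≠ k) := by
  induction ns generalizing acc with
  | nil => simp
  | cons x xs ih =>
    rw [List.foldl_cons]
    by_cases hx : x = k
    · have hb : (x == k) = true := by simp [hx]
      rw [if_pos hb, ih]
      subst hx
      simp only [List.mem_cons]
      tauto
    · have hb : (x == k) = false := by simp [hx]
      simp only [hb, Bool.false_eq_true, if_false, ih, PySem.Set.mem_add, List.mem_cons]
      constructor
      · rintro ((h | rfl) | h)
        · exact Or.inl h
        · exact Or.inr ⟨Or.inl rfl, hx⟩
        · exact Or.inr ⟨Or.inr h.1, h.2⟩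
      · rintro (h | ⟨(rfl | h1), h2⟩)
        · exact Or.inl (Or.inl h)
        · exact Or.inl (Or.inr rfl)
        · exact Or.inr ⟨h1, h2⟩

theorem mem_bacc_fold (k : String) (regions : List (String × List String))
    (acc : PySem.Set String) (m : String) :
    m ∈ regions.foldl (bAccStep k) acc ↔
      m ∈ acc ∨ ∃ rp ∈ regions,
        (rp.1 = k ∧ m ∈ rp.2 ∧ m ≠ k) ∨ (rp.1 ≠ k ∧ rp.1 = m ∧ k ∈ rp.2) := by
  induction regions generalizing acc with
  | nil => simp
  | cons rp rest ih =>
    rw [List.foldl_cons, ih]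
    have hstep : m ∈ bAccStep k acc rp ↔
        m ∈ acc ∨ (rp.1 = k ∧ m ∈ rp.2 ∧ m ≠ k) ∨ (rp.1 ≠ k ∧ rp.1 = m ∧ k ∈ rp.2) := by
      unfold bAccStep
      by_cases h1 : rp.1 = k
      · have hb : (rp.1 == k) = true := by simp [h1]
        simp only [hb, if_true, mem_bacc_inner]
        tauto
      · have hb : (rp.1 == k) = false := by simp [h1]
        simp only [hb, Bool.false_eq_true, if_false]
        by_cases h2 : k ∈ rp.2
        · have hc : rp.2.contains k = true := by simpa [List.contains_eq_mem] using h2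
          simp only [hc, if_true, PySem.Set.mem_add]
          constructor
          · rintro (h | rfl)
            · exact Or.inl h
            · exact Or.inr (Or.inr ⟨h1, rfl, h2⟩)
          · rintro (h | ⟨hk, _, _⟩ | ⟨_, rfl, _⟩)
            · exact Or.inl h
            · exact absurd hk h1
            · exact Or.inr rfl
        · have hc : rp.2.contains k = false := by simpa [List.contains_eq_mem] using h2
          simp only [hc, Bool.false_eq_true, if_false]
          constructor
          · exact fun h => Or.inl h
          · rintro (h | ⟨hk, _, _⟩ | ⟨_, _, hk⟩)
            · exact h
            · exact absurd hk h1
            · exact absurd hk h2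
    rw [hstep]
    constructor
    · rintro ((h | h) | ⟨q, hq, h⟩)
      · exact Or.inl h
      · exact Or.inr ⟨rp, by simp, h⟩
      · exact Or.inr ⟨q, by simp [hq], h⟩
    · rintro (h | ⟨q, hq, h⟩)
      · exact Or.inl (Or.inl h)
      · rcases List.mem_cons.1 hq with rfl | hq
        · exact Or.inl (Or.inr h)
        · exact Or.inr ⟨q, hq, h⟩

-- ---- nodup facts ----

theorem nodup_edges_inner (region : String) (ns : List String)
    (st : List String × PySem.Set String × PySem.Set (String × String)) (h : st.2.2.Nodup) :
    (ns.foldl (stepG_inner region) st).2.2.Nodup := by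
  induction ns generalizing st with
  | nil => exact h
  | cons x xs ih =>
    apply ih
    unfold stepG_inner
    split_ifs <;>
      first
        | exact h
        | exact PySem.Set.nodup_add _ _ (PySem.Set.nodup_add _ _ h)

theorem nodup_edges_fold (regions : List (String × List String))
    (st : List String × PySem.Set String × PySem.Set (String × String)) (h : st.2.2.Nodup) :
    (regions.foldl stepG st).2.2.Nodup := by
  induction regions generalizing st with
  | nil => exact h
  | cons rp rest ih =>
    apply ih
    unfold stepG
    split_ifs <;> exact nodup_edges_inner _ _ _ h

theorem nodup_tgts (edges : List (String × String)) (k : String) (h : edges.Nodup) :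
    (tgts edges k).Nodup := by
  unfold tgts
  apply List.Nodup.map_on _ (h.filter _)
  intro x hx y hy hxy
  have hx1 : x.1 = k := by simpa using (List.mem_filter.1 hx).2
  have hy1 : y.1 = k := by simpa using (List.mem_filter.1 hy).2
  exact Prod.ext (hx1.trans hy1.symm) hxy

theorem nodup_bacc_inner (k : String) (ns : List String) (acc : PySem.Set String)
    (h : acc.Nodup) :
    (ns.foldl (fun a n => if n == k then a else PySem.Set.add a n) acc).Nodup := by
  induction ns generalizing acc with
  | nil => exact h
  | cons x xs ih =>
    rw [List.foldl_cons]
    apply ih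
    dsimp only
    split_ifs
    · exact h
    · exact PySem.Set.nodup_add _ _ h

theorem nodup_bacc_fold (k : String) (regions : List (String × List String))
    (acc : PySem.Set String) (h : acc.Nodup) :
    (regions.foldl (bAccStep k) acc).Nodup := by
  induction regions generalizing acc with
  | nil => exact h
  | cons rp rest ih =>
    rw [List.foldl_cons]
    apply ih
    unfold bAccStep
    split_ifs
    · exact nodup_bacc_inner _ _ _ h
    · exact PySem.Set.nodup_add _ _ h
    · exact h

-- ===== VERDICT (by name: the statement is the Claim_ definition above) =====
theorem normalize_regions_py_spec : Claim_equal_normalize_regions_py := by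
  intro regions _
  unfold Spec_normalize_regions_py
  have hinv : InvAB (regions.foldl stepA PySem.Dict.empty)
      (regions.foldl stepG ([], PySem.Set.empty, PySem.Set.empty)) :=
    outer_fold regions _ _ ⟨rfl, by simp [PySem.Set.empty], by simp [PySem.Dict.empty]⟩
  obtain ⟨-, -, hitems⟩ := hinv
  set st := regions.foldl stepG ([], PySem.Set.empty, PySem.Set.empty) with hst
  have horder : regions.foldl orderStep [] = st.1 :=
    (order_fold_eq regions ([], PySem.Set.empty, PySem.Set.empty) rfl).symm
  simp only [normalize_regions_py, normalize_regions_py_alt]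
  rw [hitems, List.map_map, horder]
  apply List.map_congr_left
  intro n _
  simp only [Function.comp]
  congr 1
  -- sorted A-set = sorted B-set: same members, both nodup
  have hA : (tgts st.2.2 n).Nodup :=
    nodup_tgts _ _ (nodup_edges_fold regions _ (by simp [PySem.Set.empty]))
  have hB : (regions.foldl (bAccStep n) PySem.Set.empty).Nodup :=
    nodup_bacc_fold _ _ _ (by simp [PySem.Set.empty])
  have hmem : ∀ m, m ∈ tgts st.2.2 n ↔ m ∈ regions.foldl (bAccStep n) PySem.Set.empty := by
    intro m
    rw [mem_tgts, hst, mem_edges_fold, mem_bacc_fold]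
    simp only [PySem.Set.empty, List.not_mem_nil, false_or, EdgeIn]
    constructor
    · rintro ⟨rp, hrp, hne, h⟩
      refine ⟨rp, hrp, ?_⟩
      rcases h with ⟨h1, h2⟩ | ⟨h1, h2⟩
      · exact Or.inl ⟨h1, h2, hne⟩
      · by_cases hk : rp.1 = n
        · exact absurd (h1.symm.trans hk) hne
        · exact Or.inr ⟨hk, h1, h2⟩
    · rintro ⟨rp, hrp, ⟨h1, h2, h3⟩ | ⟨h1, h2, h3⟩⟩
      · exact ⟨rp, hrp, h3, Or.inl ⟨h1, h2⟩⟩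
      · exact ⟨rp, hrp, fun hh => h1 (h2.trans hh), Or.inr ⟨h2, h3⟩⟩
  have hperm : (tgts st.2.2 n).Perm (regions.foldl (bAccStep n) PySem.Set.empty) :=
    (List.perm_ext_iff_of_nodup hA hB).2 hmem
  have : nbrsOf regions n =
      PySem.List.sorted (regions.foldl (bAccStep n) PySem.Set.empty) (fun x => x) false := by
    unfold nbrsOf bAccStep
    rfl
  rw [this]
  exact PySem.List.sorted_eq_sorted_of_perm _ _ _ (fun a b h => h) hperm
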